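-- pv_equiv track=rewrite | github.com/AisteSaltenyte/checkio.org_solutions | checkio_ELEMENTARY.py | nearest_value
-- ===== SOURCE A (Python) =====
-- def nearest_value(values: set, one: int) -> int:
--     nearest = None
--     min_distance = None
--     for item in values:
--         if min_distance is None or abs(item - one) < min_distance:
--             min_distance = abs(item - one)
--             nearest = item
--         elif abs(item - one) == min_distance and item < nearest:
--             nearest = item
--     return nearest
-- ===== SOURCE B (Python) =====
-- def nearest_value(values: set, one: int) -> int:
--     s = sorted(values)
--     # bisect_left by hand (no imports in the original module)
--     lo, hi = 0, len(s)
--     while lo < hi: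
--         mid = (lo + hi) // 2
--         if s[mid] < one:
--             lo = mid + 1
--         else:
--             hi = mid
--     if lo == len(s):
--         return s[-1]
--     if lo == 0:
--         return s[0]
--     a, b = s[lo - 1], s[lo]
--     return a if one - a <= b - one else b
-- ===== Notes on version B (the rewrite author's own statement) =====
-- stated objective: alternative
-- what changed: Replaces A's single min-tracking scan over the whole set (state: nearest, min_distance) by sort + hand-written bisect_left binary search that inspects only the two neighbours of the insertion point; tie goes to the left (smaller) neighbour. Pre_ excludes only the empty set, on which A returns None instead of an int.
-- outside the precondition, e.g. on nearest_value(set(), 5): A returns None, B raises IndexError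
import Mathlib
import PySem

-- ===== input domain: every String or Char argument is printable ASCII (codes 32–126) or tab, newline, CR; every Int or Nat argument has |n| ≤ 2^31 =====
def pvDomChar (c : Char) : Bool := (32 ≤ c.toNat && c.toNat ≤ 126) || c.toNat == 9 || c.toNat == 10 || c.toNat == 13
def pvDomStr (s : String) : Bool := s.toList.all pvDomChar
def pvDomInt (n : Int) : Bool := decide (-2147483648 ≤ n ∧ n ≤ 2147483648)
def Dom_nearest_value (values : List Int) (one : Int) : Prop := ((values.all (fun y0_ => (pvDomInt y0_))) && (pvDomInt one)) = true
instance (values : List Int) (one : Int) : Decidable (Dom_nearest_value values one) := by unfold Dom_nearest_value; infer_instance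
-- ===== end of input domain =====

-- B replaces A's single min-tracking scan by sort + hand-written binary search inspecting only
-- the two neighbours of the insertion point (objective: alternative; not faster at these sizes).
-- A's result is independent of the set's iteration order (the minimised key (|x-one|, x) is injective).

-- ===== PORT A =====
-- the loop body of A: state = (nearest, min_distance), both None initially
def aStep (one : Int) (st : Option Int × Option Int) (item : Int) : Option Int × Option Int :=
  match st.2 with
  | none => (some item, some |item - one|)
  | some d =>
    if |item - one| < d then (some item, some |item - one|)
    else if |item - one| = d ∧ item < st.1.getD 0 then (some item, st.2)
    else st

def nearest_value (values : List Int) (one : Int) : Int :=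
  ((values.foldl (aStep one) (none, none)).1).getD 0
  -- Python returns None (not an int) on the empty set; that input is excluded by Pre_.

-- ===== PORT B =====
-- the tail of Source B after the loop: choose among the neighbours of the insertion point i
def bSelect (s : List Int) (one : Int) (i : Nat) : Int :=
  if i = s.length then s.getD (s.length - 1) 0   -- s[-1]; s nonempty under Pre_
  else if i = 0 then s.getD 0 0
  else
    let a := s.getD (i - 1) 0
    let b := s.getD i 0
    if one - a ≤ b - one then a else b

def nearest_value_alt (values : List Int) (one : Int) : Int :=
  let s := PySem.List.sorted values (fun x => x)
  -- hand-written bisect_left loop of Source B: PySem.List.bisectLeft is exactly that lo/hi halving loop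
  bSelect s one (PySem.List.bisectLeft s one)

-- ===== PRECONDITION & SPEC =====
-- Pre_ excludes only the empty set, on which A returns None (no int value).
def Pre_nearest_value (values : List Int) (one : Int) : Prop := values ≠ []
instance (values : List Int) (one : Int) : Decidable (Pre_nearest_value values one) := by
  unfold Pre_nearest_value; infer_instance

def pvWitness_nearest_value : List Int × Int := ([4, 7, 10, 11, 12], 9)

def Spec_nearest_value (values : List Int) (one : Int) (out : Int) : Prop := out = nearest_value_alt values one
instance (values : List Int) (one : Int) (out : Int) : Decidable (Spec_nearest_value values one out) := by unfold Spec_nearest_value; infer_instance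

-- ===== CLAIM (what is proved, stated in full; the proofs are below) =====
def Claim_equal_nearest_value : Prop := ∀ (values : List Int) (one : Int), Dom_nearest_value values one → Pre_nearest_value values one → Spec_nearest_value values one (nearest_value values one)

-- ===== LEMMAS AND PROOFS =====

-- the key both programs minimise, as a relation: (|m-one|, m) ≤lex (|y-one|, y)
def kLe (one m y : Int) : Prop := |m - one| < |y - one| ∨ (|m - one| = |y - one| ∧ m ≤ y)

theorem kLe_refl (one m : Int) : kLe one m m := Or.inr ⟨rfl, le_refl m⟩

theorem kLe_trans {one a b c : Int} (h1 : kLe one a b) (h2 : kLe one b c) : kLe one a c := by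
  simp only [kLe, Int.abs_eq_natAbs] at *; omega

theorem kLe_antisymm {one m r : Int} (h1 : kLe one m r) (h2 : kLe one r m) : m = r := by
  simp only [kLe, Int.abs_eq_natAbs] at *; omega

-- A's loop body once the state is a real element
def amin (one a x : Int) : Int :=
  if |x - one| < |a - one| then x else if |x - one| = |a - one| ∧ x < a then x else a

theorem aStep_some (one v x : Int) :
    aStep one (some v, some |v - one|) x = (some (amin one v x), some |amin one v x - one|) := by
  simp only [aStep, amin, Option.getD_some]
  split_ifs with h1 h2 <;> simp_all

theorem foldA (one : Int) (vs : List Int) (v : Int) :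
    vs.foldl (aStep one) (some v, some |v - one|)
      = (some (vs.foldl (amin one) v), some |vs.foldl (amin one) v - one|) := by
  induction vs generalizing v with
  | nil => simp
  | cons x t ih => simp [List.foldl_cons, aStep_some, ih]

theorem A_eq (one v : Int) (vs : List Int) :
    nearest_value (v :: vs) one = vs.foldl (amin one) v := by
  have h0 : aStep one (none, none) v = (some v, some |v - one|) := by simp [aStep]
  simp [nearest_value, List.foldl_cons, h0, foldA]

theorem amin_cases (one a x : Int) : amin one a x = a ∨ amin one a x = x := by
  unfold amin; split_ifs <;> simp

theorem amin_kLe_left (one a x : Int) : kLe one (amin one a x) a := by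
  simp only [amin, kLe]; split_ifs with h1 h2
  · exact Or.inl h1
  · exact Or.inr ⟨h2.1, le_of_lt h2.2⟩
  · exact Or.inr ⟨rfl, le_refl a⟩

theorem amin_kLe_right (one a x : Int) : kLe one (amin one a x) x := by
  simp only [amin, kLe, Int.abs_eq_natAbs]; split_ifs <;> omega

theorem fold_mem (one : Int) (vs : List Int) (v : Int) : vs.foldl (amin one) v ∈ v :: vs := by
  induction vs generalizing v with
  | nil => simp
  | cons x t ih =>
    have h := ih (amin one v x)
    rcases List.mem_cons.mp h with h' | h'
    · rcases amin_cases one v x with hc | hc <;> rw [List.foldl_cons, h', hc] <;> simp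
    · rw [List.foldl_cons]; exact List.mem_cons.mpr (Or.inr (List.mem_cons.mpr (Or.inr h')))

theorem fold_min (one : Int) (vs : List Int) (v : Int) :
    ∀ y ∈ v :: vs, kLe one (vs.foldl (amin one) v) y := by
  induction vs generalizing v with
  | nil => intro y hy; simp at hy; subst hy; exact kLe_refl one y
  | cons x t ih =>
    intro y hy
    have ihh := ih (amin one v x)
    have hhead : kLe one (t.foldl (amin one) (amin one v x)) (amin one v x) :=
      ihh _ List.mem_cons_self
    rcases List.mem_cons.mp hy with h' | h'
    · subst h'
      exact kLe_trans hhead (amin_kLe_left one y x)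
    · rcases List.mem_cons.mp h' with h'' | h''
      · subst h''
        exact kLe_trans hhead (amin_kLe_right one v y)
      · exact ihh y (List.mem_cons.mpr (Or.inr h''))

-- B's neighbour selection is a key-minimal element of the sorted list
theorem bSelect_spec (s : List Int) (one : Int)
    (hs : List.Pairwise (fun a b : Int => a ≤ b) s) (hn : 0 < s.length) :
    bSelect s one (PySem.List.bisectLeft s one) ∈ s ∧
      ∀ y ∈ s, kLe one (bSelect s one (PySem.List.bisectLeft s one)) y := by
  obtain ⟨hile, hlt, hge⟩ := PySem.List.bisectLeft_spec s one hs
  set i := PySem.List.bisectLeft s one with hidef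
  have hgd : ∀ (j : ℕ) (hj : j < s.length), s.getD j 0 = s[j]'hj := by
    intro j hj
    simp [List.getD_eq_getElem?_getD, List.getElem?_eq_getElem hj]
  have mono : ∀ (p q : ℕ) (hpq : p ≤ q) (hq : q < s.length), s[p]'(by omega) ≤ s[q]'hq := by
    intro p q hpq hq
    have hp : List.Pairwise (fun a b : Int => a ≤ b) s := hs
    rcases Nat.lt_or_ge p q with h | h
    · exact (List.pairwise_iff_getElem.mp hp p q (by omega) hq h)
    · have : p = q := by omega
      subst this; exact le_refl _
  unfold bSelect
  split_ifs with hieq hi0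
  · -- i = s.length : every element is < one; answer is the last (largest) element
    rw [hgd (s.length - 1) (by omega)]
    refine ⟨List.getElem_mem _, ?_⟩
    intro y hy
    obtain ⟨j, hj, rfl⟩ := List.mem_iff_getElem.mp hy
    have h1 : s[j] < one := hlt j hj (by omega)
    have h2 : s[s.length - 1]'(by omega) < one := hlt _ (by omega) (by omega)
    have h3 : s[j] ≤ s[s.length - 1]'(by omega) := mono j (s.length - 1) (by omega) (by omega)
    simp only [kLe, Int.abs_eq_natAbs]; omega
  · -- i = 0 : every element is ≥ one; answer is the first (smallest) element
    rw [hgd 0 hn]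
    refine ⟨List.getElem_mem _, ?_⟩
    intro y hy
    obtain ⟨j, hj, rfl⟩ := List.mem_iff_getElem.mp hy
    have h1 : one ≤ s[j] := hge j hj (by omega)
    have h2 : one ≤ s[0]'hn := hge 0 hn (by omega)
    have h3 : s[0]'hn ≤ s[j] := mono 0 j (by omega) hj
    simp only [kLe, Int.abs_eq_natAbs]; omega
  · -- 0 < i < s.length : the two neighbours s[i-1] < one ≤ s[i]
    have hi1 : i - 1 < s.length := by omega
    have hi2 : i < s.length := by omega
    show (if one - s.getD (i - 1) 0 ≤ s.getD i 0 - one then s.getD (i - 1) 0 else s.getD i 0) ∈ s ∧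
      ∀ y ∈ s, kLe one (if one - s.getD (i - 1) 0 ≤ s.getD i 0 - one then s.getD (i - 1) 0 else s.getD i 0) y
    rw [hgd (i - 1) hi1, hgd i hi2]
    have ha : s[i - 1]'hi1 < one := hlt (i - 1) hi1 (by omega)
    have hb : one ≤ s[i]'hi2 := hge i hi2 (by omega)
    split_ifs with hcmp <;>
    · refine ⟨List.getElem_mem _, ?_⟩
      intro y hy
      obtain ⟨j, hj, rfl⟩ := List.mem_iff_getElem.mp hy
      rcases Nat.lt_or_ge j i with hji | hji
      · have h1 : s[j] < one := hlt j hj hji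
        have h2 : s[j] ≤ s[i - 1]'hi1 := mono j (i - 1) (by omega) hi1
        simp only [kLe, Int.abs_eq_natAbs]; omega
      · have h1 : one ≤ s[j] := hge j hj hji
        have h2 : s[i]'hi2 ≤ s[j] := mono i j hji hj
        simp only [kLe, Int.abs_eq_natAbs]; omega

-- B's result is a key-minimal element of the sorted list
theorem B_spec (values : List Int) (one : Int) (h : values ≠ []) :
    nearest_value_alt values one ∈ PySem.List.sorted values (fun x => x) ∧
      ∀ y ∈ PySem.List.sorted values (fun x => x), kLe one (nearest_value_alt values one) y := by
  have hsne : PySem.List.sorted values (fun x => x) ≠ [] := by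
    intro hnil; exact h ((PySem.List.sorted_eq_nil_iff values (fun x => x) false).mp hnil)
  have hn : 0 < (PySem.List.sorted values (fun x => x)).length := by
    rcases hcase : PySem.List.sorted values (fun x => x) with _ | ⟨a, t⟩
    · exact absurd hcase hsne
    · simp
  unfold nearest_value_alt
  exact bSelect_spec _ one (PySem.List.sorted_pairwise values (fun x => x)) hn

-- ===== VERDICT (by name: the statement is the Claim_ definition above) =====
theorem nearest_value_spec : Claim_equal_nearest_value := by
  intro values one _hdom hpre
  unfold Spec_nearest_value
  obtain ⟨v, vs, rfl⟩ : ∃ v vs, values = v :: vs := by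
    cases values with
    | nil => exact absurd rfl hpre
    | cons v vs => exact ⟨v, vs, rfl⟩
  have hA := A_eq one v vs
  obtain ⟨hBmem, hBmin⟩ := B_spec (v :: vs) one (by simp)
  have hAmem : vs.foldl (amin one) v ∈ v :: vs := fold_mem one vs v
  have hAmem' : vs.foldl (amin one) v ∈ PySem.List.sorted (v :: vs) (fun x => x) :=
    (PySem.List.mem_sorted _ _ _ _).mpr hAmem
  have hBmem' : nearest_value_alt (v :: vs) one ∈ v :: vs :=
    (PySem.List.mem_sorted _ _ _ _).mp hBmem
  have h1 : kLe one (vs.foldl (amin one) v) (nearest_value_alt (v :: vs) one) :=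
    fold_min one vs v _ hBmem'
  have h2 : kLe one (nearest_value_alt (v :: vs) one) (vs.foldl (amin one) v) :=
    hBmin _ hAmem'
  rw [hA]
  exact kLe_antisymm h1 h2
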